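-- pv_equiv track=rewrite | github.com/lawrenceamadi/RaadNet | pose_detection/coco_hpe.py | set_spaced_colors
-- ===== SOURCE A (Python) =====
-- def set_spaced_colors(colorKeys):
--     # evenly spaced colors
--     n = len(colorKeys)
--     maxValue = 16581375  # 255**3
--     minValue = 8000 # 20**3
--     interval = int((maxValue - minValue) / n)
--     hxColors = [hex(I)[2:].zfill(6) for I in range(minValue, maxValue, interval)]
--     colors = [(int(i[:2], 16), int(i[2:4], 16), int(i[4:], 16)) for i in hxColors]
--     return dict(zip(colorKeys, colors))
-- ===== SOURCE B (Python) =====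
-- def set_spaced_colors(colorKeys):
--     # evenly spaced colors, derived arithmetically (no hex-string round-trip)
--     n = len(colorKeys)
--     maxValue = 16581375  # 255**3
--     minValue = 8000  # 20**3
--     interval = int((maxValue - minValue) / n)
--     result = {}
--     for i, key in enumerate(colorKeys):
--         value = minValue + i * interval
--         r, rem = divmod(value, 65536)
--         g, b = divmod(rem, 256)
--         result[key] = (r, g, b)
--     return result
-- ===== Notes on version B (the rewrite author's own statement) =====
-- stated objective: simpler
-- what changed: B drops A's hex-string formatting/zfill/parsing round-trip and the separate range/zip lists, computing each color directly by divmod arithmetic in a single enumerate pass.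
import Mathlib
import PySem

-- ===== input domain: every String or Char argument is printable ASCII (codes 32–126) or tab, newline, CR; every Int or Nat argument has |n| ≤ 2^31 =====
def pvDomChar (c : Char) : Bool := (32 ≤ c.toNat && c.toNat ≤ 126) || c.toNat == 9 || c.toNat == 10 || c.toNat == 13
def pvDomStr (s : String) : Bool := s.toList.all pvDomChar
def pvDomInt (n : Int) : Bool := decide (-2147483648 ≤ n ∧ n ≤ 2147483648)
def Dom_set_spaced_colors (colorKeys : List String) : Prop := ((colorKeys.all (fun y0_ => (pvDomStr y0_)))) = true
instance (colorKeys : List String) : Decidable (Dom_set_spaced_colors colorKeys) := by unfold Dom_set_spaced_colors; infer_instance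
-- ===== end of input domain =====

-- B replaces A's hex-string format/parse round-trip by direct divmod arithmetic in one enumerate pass (objective: simpler).

-- ===== PORT A =====
-- hex(I) for I ≥ 0, digits MSB-first (hand port of CPython's repeated divmod-by-16; exact for nonnegative I)
def pvHexDigits (v : Nat) : List Nat :=
  if _h : v < 16 then [v] else pvHexDigits (v / 16) ++ [v % 16]
decreasing_by exact Nat.div_lt_self (by omega) (by norm_num)

def pvHexChar (d : Nat) : Char := if d < 10 then Char.ofNat (48 + d) else Char.ofNat (87 + d)
def pvHexVal (c : Char) : Nat := if c.toNat ≤ 57 then c.toNat - 48 else c.toNat - 87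
-- int(cs, 16) for lowercase hex digit strings (hand port, exact on the 2/2/2-char slices built below)
def pvParseHex (cs : List Char) : Int := ((cs.foldl (fun a c => 16 * a + pvHexVal c) 0 : Nat) : Int)

def set_spaced_colors (colorKeys : List String) : List (String × Int × Int × Int) :=
  let n : Int := colorKeys.length
  let maxValue : Int := 16581375
  let minValue : Int := 8000
  -- int((maxValue - minValue) / n): float division then truncation; equals floor division for every
  -- n ≥ 1 (numerator < 2^24, so the rounded double quotient never crosses an integer boundary)
  let interval : Int := PySem.Int.floordiv (maxValue - minValue) n
  -- hex(I)[2:].zfill(6): I ≥ 0 here, so [2:] strips exactly the '0x' prefix; zfill pads with '0' to length 6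
  let hxColors : List (List Char) :=
    (PySem.List.pyRange minValue maxValue interval).map
      (fun I => let s := (pvHexDigits I.toNat).map pvHexChar
                List.replicate (6 - s.length) '0' ++ s)
  -- (int(i[:2],16), int(i[2:4],16), int(i[4:],16)): slices on the 6-char string = take 2 / (drop 2).take 2 / drop 4 (indices in range)
  let colors := hxColors.map (fun i => (pvParseHex (i.take 2), pvParseHex ((i.drop 2).take 2), pvParseHex (i.drop 4)))
  (PySem.Dict.ofList (colorKeys.zip colors)).items

-- ===== PORT B =====
def set_spaced_colors_alt (colorKeys : List String) : List (String × Int × Int × Int) :=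
  let n : Int := colorKeys.length
  let maxValue : Int := 16581375
  let minValue : Int := 8000
  let interval : Int := PySem.Int.floordiv (maxValue - minValue) n  -- int((max-min)/n), same note as in A
  ((PySem.List.enumerate colorKeys 0).foldl (fun d p =>
      let value := minValue + p.1 * interval
      let r := PySem.Int.floordiv value 65536
      let rem := PySem.Int.mod value 65536
      let g := PySem.Int.floordiv rem 256
      let b := PySem.Int.mod rem 256
      d.insert p.2 (r, g, b)) PySem.Dict.empty).items

-- ===== PRECONDITION & SPEC =====
-- Pre_ excludes exactly the inputs where A raises: the empty list (ZeroDivisionError) and lists longer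
-- than 16573375, where interval becomes 0 and range(...) raises ValueError.
def Pre_set_spaced_colors (colorKeys : List String) : Prop :=
  colorKeys ≠ [] ∧ colorKeys.length ≤ 16573375
instance (colorKeys : List String) : Decidable (Pre_set_spaced_colors colorKeys) := by
  unfold Pre_set_spaced_colors; infer_instance
def pvWitness_set_spaced_colors : List String := ["a", "b"]

def Spec_set_spaced_colors (colorKeys : List String) (out : List (String × Int × Int × Int)) : Prop := out = set_spaced_colors_alt colorKeys
instance (colorKeys : List String) (out : List (String × Int × Int × Int)) : Decidable (Spec_set_spaced_colors colorKeys out) := by unfold Spec_set_spaced_colors; infer_instance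

-- ===== CLAIM (what is proved, stated in full; the proofs are below) =====
def Claim_equal_set_spaced_colors : Prop := ∀ (colorKeys : List String), Dom_set_spaced_colors colorKeys → Pre_set_spaced_colors colorKeys → Spec_set_spaced_colors colorKeys (set_spaced_colors colorKeys)

-- ===== LEMMAS AND PROOFS =====

theorem pvHexDigits_lt (v : Nat) : ∀ d ∈ pvHexDigits v, d < 16 := by
  induction v using pvHexDigits.induct with
  | case1 v h => intro d hd; rw [pvHexDigits, dif_pos h] at hd; simp at hd; omega
  | case2 v h ih =>
    rw [pvHexDigits, dif_neg h]
    intro d hd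
    rcases List.mem_append.mp hd with h1 | h1
    · exact ih d h1
    · simp at h1; omega

theorem pvHexDigits_val (v : Nat) :
    (pvHexDigits v).foldl (fun a d => 16 * a + d) 0 = v := by
  induction v using pvHexDigits.induct with
  | case1 v h => simp [pvHexDigits, h]
  | case2 v h ih =>
    rw [pvHexDigits, dif_neg h, List.foldl_append, ih]
    simp; omega

theorem pvHexDigits_len : ∀ (k v : Nat), v < 16 ^ (k + 1) → (pvHexDigits v).length ≤ k + 1 := by
  intro k
  induction k with
  | zero => intro v hv; rw [pvHexDigits, dif_pos (by omega)]; simp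
  | succ k ih =>
    intro v hv
    by_cases h : v < 16
    · rw [pvHexDigits, dif_pos h]; simp
    · rw [pvHexDigits, dif_neg h]
      have hd : v / 16 < 16 ^ (k + 1) := by
        rw [Nat.div_lt_iff_lt_mul (by norm_num)]
        calc v < 16 ^ (k + 1 + 1) := hv
        _ = 16 ^ (k + 1) * 16 := by ring
      have := ih (v / 16) hd
      simp [List.length_append]
      omega

theorem pvRound : ∀ d < 16, pvHexVal (pvHexChar d) = d := by decide

theorem pvHex_bytes (w : Nat) (hw : w < 16777216) :
    (pvParseHex (((List.replicate (6 - ((pvHexDigits w).map pvHexChar).length) '0' ++ (pvHexDigits w).map pvHexChar)).take 2),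
     pvParseHex ((((List.replicate (6 - ((pvHexDigits w).map pvHexChar).length) '0' ++ (pvHexDigits w).map pvHexChar)).drop 2).take 2),
     pvParseHex (((List.replicate (6 - ((pvHexDigits w).map pvHexChar).length) '0' ++ (pvHexDigits w).map pvHexChar)).drop 4))
    = (((w / 65536 : Nat) : Int), ((w % 65536 / 256 : Nat) : Int), ((w % 256 : Nat) : Int)) := by
  have hlt := pvHexDigits_lt w
  have hlen : (pvHexDigits w).length ≤ 6 := pvHexDigits_len 5 w (by omega)
  have hval := pvHexDigits_val w
  have hpad : List.replicate (6 - ((pvHexDigits w).map pvHexChar).length) '0' ++ (pvHexDigits w).map pvHexChar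
      = (List.replicate (6 - (pvHexDigits w).length) 0 ++ pvHexDigits w).map pvHexChar := by
    simp [List.map_append, List.map_replicate]
    right; rfl
  rw [hpad]
  set es := List.replicate (6 - (pvHexDigits w).length) 0 ++ pvHexDigits w with hes
  have heslen : es.length = 6 := by simp [hes]; omega
  have heslt : ∀ d ∈ es, d < 16 := by
    intro d hd
    rcases List.mem_append.mp hd with h1 | h1
    · have := List.eq_of_mem_replicate h1; omega
    · exact hlt d h1
  have hesval : es.foldl (fun a d => 16 * a + d) 0 = w := by
    rw [hes, List.foldl_append]
    have : ∀ m : Nat, (List.replicate m (0:Nat)).foldl (fun a d => 16 * a + d) 0 = 0 := by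
      intro m; induction m with
      | zero => rfl
      | succ m ih => simpa [List.replicate_succ] using ih
    rw [this, hval]
  clear hpad hes hlt hlen hval
  match es, heslen with
  | [a, b, c, d, e, f], _ =>
    simp only [List.mem_cons] at heslt
    have ha := heslt a (by tauto); have hb := heslt b (by tauto); have hc := heslt c (by tauto)
    have hd := heslt d (by tauto); have he := heslt e (by tauto); have hf := heslt f (by tauto)
    simp only [List.foldl_cons, List.foldl_nil] at hesval
    simp only [List.map_cons, List.map_nil, List.take, List.drop, pvParseHex,
      List.foldl_cons, List.foldl_nil, Prod.mk.injEq]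
    rw [pvRound a ha, pvRound b hb, pvRound c hc, pvRound d hd, pvRound e he, pvRound f hf]
    refine ⟨?_, ?_, ?_⟩ <;> · rw [Nat.cast_inj]; omega
theorem set_spaced_colors_spec : Claim_equal_set_spaced_colors := by
  intro ks _hdom hpre
  obtain ⟨hne, hlen⟩ := hpre
  unfold Spec_set_spaced_colors
  have hn1 : 1 ≤ ks.length := List.length_pos_iff.mpr hne
  simp only [set_spaced_colors, set_spaced_colors_alt]
  have hN1 : (1:Int) ≤ (ks.length : Int) := by exact_mod_cast hn1
  have hNle : (ks.length : Int) ≤ 16573375 := by exact_mod_cast hlen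
  have hfd : PySem.Int.floordiv (16581375 - 8000) (ks.length : Int) = (16573375:Int) / (ks.length : Int) := by
    rw [PySem.Int.floordiv_eq_ediv_of_pos (by omega : (0:Int) < (ks.length : Int))]
    norm_num
  rw [hfd]
  set s : Int := (16573375:Int) / (ks.length : Int) with hs
  have hs1 : (1:Int) ≤ s := (Int.le_ediv_iff_mul_le (by omega)).mpr (by omega)
  have hns : (ks.length : Int) * s ≤ 16573375 := by
    have h := Int.ediv_mul_le (16573375:Int) (b := (ks.length : Int)) (by omega)
    rw [← hs] at h
    linarith [mul_comm (ks.length : Int) s]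
  rw [PySem.List.pyRange_of_pos 8000 16581375 (by omega)]
  rw [if_pos (by norm_num : (8000:Int) < 16581375)]
  set L : Nat := ((16581375 - 8000 + s - 1) / s).toNat with hL
  have hnL : ks.length ≤ L := by
    have h1 : (ks.length : Int) ≤ (16581375 - 8000 + s - 1) / s :=
      (Int.le_ediv_iff_mul_le (by omega)).mpr (by linarith)
    omega
  simp only [PySem.Dict.ofList, PySem.Dict.update, List.map_map]
  have hpairs : ks.zip ((List.range L).map
        ((fun i => (pvParseHex (i.take 2), pvParseHex ((i.drop 2).take 2), pvParseHex (i.drop 4))) ∘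
         (fun I : Int => List.replicate (6 - ((pvHexDigits I.toNat).map pvHexChar).length) '0' ++ (pvHexDigits I.toNat).map pvHexChar) ∘
         (fun k : Nat => 8000 + s * (k : Int))))
      = (PySem.List.enumerate ks 0).map (fun p =>
          (p.2, (PySem.Int.floordiv (8000 + p.1 * s) 65536,
                 PySem.Int.floordiv (PySem.Int.mod (8000 + p.1 * s) 65536) 256,
                 PySem.Int.mod (PySem.Int.mod (8000 + p.1 * s) 65536) 256))) := by
    apply List.ext_getElem
    · simp [PySem.List.length_enumerate]
      omega
    · intro i h1 h2
      simp only [List.getElem_zip, List.getElem_map, List.getElem_range,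
        PySem.List.getElem_enumerate, Function.comp_apply, Prod.mk.injEq]
      have hiks : i < ks.length := by
        simp [List.length_zip] at h1
        omega
      refine ⟨trivial, ?_⟩
      have hi : (i : Int) ≤ (ks.length : Int) - 1 := by
        have : (i : Int) < (ks.length : Int) := by exact_mod_cast hiks
        omega
      have hsv : s * (i : Int) ≤ 16573374 := by
        have h3 : s * (i : Int) ≤ s * ((ks.length : Int) - 1) :=
          mul_le_mul_of_nonneg_left hi (by omega)
        nlinarith
      have hvlo : (0:Int) ≤ 8000 + s * (i : Int) := by positivity
      have hvw : (8000 + s * (i : Int)) = (((8000 + s * (i : Int)).toNat : Nat) : Int) :=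
        (Int.toNat_of_nonneg hvlo).symm
      set w : Nat := (8000 + s * (i : Int)).toNat with hw
      have hwlt : w < 16777216 := by omega
      have hb := pvHex_bytes w hwlt
      simp only [Prod.mk.injEq] at hb
      obtain ⟨e1, e2, e3⟩ := hb
      have hval : 8000 + (0 + (i:Int)) * s = (w : Int) := by rw [← hvw]; ring
      rw [hval]
      rw [show (65536:Int) = ((65536:Nat):Int) from by norm_num,
          show (256:Int) = ((256:Nat):Int) from by norm_num]
      simp only [PySem.Int.floordiv_natCast, PySem.Int.mod_natCast]
      refine ⟨e1, e2, ?_⟩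
      rw [e3]
      congr 1
      omega
  rw [hpairs, List.foldl_map]
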